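-- pv_equiv track=rewrite | github.com/navya099/AutoPole | core/POLE/pole_utils.py | generate_postnumbers
-- ===== SOURCE A (Python) =====
-- def generate_postnumbers(lst: list[int]) -> list[tuple[int, str]]:
--     postnumbers = []
--     prev_km = -1
--     count = 0
--
--     for number in lst:
--         km = number // 1000  # 1000으로 나눈 몫이 같은 구간
--         if km == prev_km:
--             count += 1  # 같은 구간에서 숫자 증가
--         else:
--             prev_km = km
--             count = 1  # 새로운 구간이므로 count를 0으로 초기화
--
--         postnumbers.append((number, f'{km}-{count}'))
--
--     return postnumbers
-- ===== SOURCE B (Python) =====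
-- def generate_postnumbers(lst: list[int]) -> list[tuple[int, str]]:
--     out = []
--     i = 0
--     n = len(lst)
--     while i < n:
--         km = lst[i] // 1000
--         j = i
--         while j < n and lst[j] // 1000 == km:
--             j += 1
--         for idx, number in enumerate(lst[i:j], 1):
--             out.append((number, f'{km}-{idx}'))
--         i = j
--     return out
-- ===== Notes on version B (the rewrite author's own statement) =====
-- stated objective: alternative
-- what changed: Replaced the single running prev_km/count state machine with a two-level group-then-enumerate traversal: split the list into maximal runs sharing n // 1000, then number each run from 1.
import Mathlib
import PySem

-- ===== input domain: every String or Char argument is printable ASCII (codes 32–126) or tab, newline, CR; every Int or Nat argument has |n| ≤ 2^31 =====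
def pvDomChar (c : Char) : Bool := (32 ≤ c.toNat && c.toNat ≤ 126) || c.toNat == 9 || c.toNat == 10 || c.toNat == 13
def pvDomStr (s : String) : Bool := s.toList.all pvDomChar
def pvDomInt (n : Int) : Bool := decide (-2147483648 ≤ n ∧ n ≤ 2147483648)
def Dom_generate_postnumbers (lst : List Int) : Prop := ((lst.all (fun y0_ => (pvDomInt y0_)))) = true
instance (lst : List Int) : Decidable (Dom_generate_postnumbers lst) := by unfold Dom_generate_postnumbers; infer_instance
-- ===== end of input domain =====

-- B replaces A's running prev_km/count bookkeeping with an explicit group-then-enumerate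
-- two-level traversal (split into maximal same-km runs, number each run from 1); objective: alternative.


-- ===== PORT A =====
-- A's for-loop over (prev_km, count, acc) as the obvious structural recursion on the list.
def pvGoA (prev_km count : Int) : List Int → List (Int × String)
  | [] => []
  | number :: rest =>
    let km := PySem.Int.floordiv number 1000
    if km == prev_km then
      (number, PySem.Int.toStr km ++ "-" ++ PySem.Int.toStr (count + 1)) :: pvGoA prev_km (count + 1) rest
    else
      (number, PySem.Int.toStr km ++ "-" ++ PySem.Int.toStr 1) :: pvGoA km 1 rest

def generate_postnumbers (lst : List Int) : List (Int × String) :=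
  pvGoA (-1) 0 lst

-- ===== PORT B =====
-- Source B's inner 'while j < n and lst[j] // 1000 == km' scan: split off the maximal run with quotient km.
def pvTakeRun (km : Int) : List Int → List Int × List Int
  | [] => ([], [])
  | m :: rest =>
    if PySem.Int.floordiv m 1000 == km then
      let p := pvTakeRun km rest
      (m :: p.1, p.2)
    else ([], m :: rest)

theorem pvTakeRun_snd_length (km : Int) (l : List Int) : (pvTakeRun km l).2.length ≤ l.length := by
  induction l with
  | nil => simp [pvTakeRun]
  | cons m rest ih =>
    simp only [pvTakeRun]
    split
    · simp; omega
    · simp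

-- Source B's 'for idx, number in enumerate(lst[i:j], 1)' loop.
def pvLabelRun (km idx : Int) : List Int → List (Int × String)
  | [] => []
  | m :: ms => (m, PySem.Int.toStr km ++ "-" ++ PySem.Int.toStr idx) :: pvLabelRun km (idx + 1) ms

-- Source B's outer 'while i < n' loop over runs.
def pvGoB : List Int → List (Int × String)
  | [] => []
  | m :: rest =>
    let km := PySem.Int.floordiv m 1000
    let p := pvTakeRun km rest
    pvLabelRun km 1 (m :: p.1) ++ pvGoB p.2
  termination_by l => l.length
  decreasing_by
    simpa using Nat.lt_succ_of_le (pvTakeRun_snd_length _ rest)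

def generate_postnumbers_alt (lst : List Int) : List (Int × String) :=
  pvGoB lst

-- ===== PRECONDITION & SPEC =====
def Spec_generate_postnumbers (lst : List Int) (out : List (Int × String)) : Prop := out = generate_postnumbers_alt lst
instance (lst : List Int) (out : List (Int × String)) : Decidable (Spec_generate_postnumbers lst out) := by unfold Spec_generate_postnumbers; infer_instance

-- ===== CLAIM (what is proved, stated in full; the proofs are below) =====
def Claim_equal_generate_postnumbers : Prop := ∀ (lst : List Int), Dom_generate_postnumbers lst → Spec_generate_postnumbers lst (generate_postnumbers lst)

-- ===== LEMMAS AND PROOFS =====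

-- After A has entered a run with quotient km, counting from count, it produces exactly
-- the enumerated rest of the run followed by the groupwise output of the remainder.
theorem pvGoA_run (l : List Int) : ∀ (km count : Int),
    pvGoA km count l = pvLabelRun km (count + 1) (pvTakeRun km l).1 ++ pvGoB (pvTakeRun km l).2 := by
  induction l with
  | nil => intro km count; simp [pvGoA, pvTakeRun, pvLabelRun, pvGoB]
  | cons m rest ih =>
    intro km count
    by_cases h : PySem.Int.floordiv m 1000 = km
    · simp only [pvGoA, pvTakeRun, h, beq_self_eq_true, if_true, pvLabelRun]
      rw [ih, List.cons_append]
    · have hb : (PySem.Int.floordiv m 1000 == km) = false := beq_eq_false_iff_ne.mpr h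
      simp only [pvGoA, pvTakeRun, hb, if_false, Bool.false_eq_true]
      rw [pvGoB, ih]
      simp [pvLabelRun]

theorem pvAB (lst : List Int) : generate_postnumbers lst = generate_postnumbers_alt lst := by
  cases lst with
  | nil => simp [generate_postnumbers, generate_postnumbers_alt, pvGoA, pvGoB]
  | cons n rest =>
    unfold generate_postnumbers generate_postnumbers_alt
    rw [pvGoB, pvLabelRun]
    by_cases h : PySem.Int.floordiv n 1000 = -1
    · simp only [pvGoA, h, beq_self_eq_true, if_true]
      rw [pvGoA_run]
      norm_num
    · have hb : (PySem.Int.floordiv n 1000 == (-1 : Int)) = false := beq_eq_false_iff_ne.mpr h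
      simp only [pvGoA, hb, if_false, Bool.false_eq_true]
      rw [pvGoA_run]
      norm_num

-- ===== VERDICT (by name: the statement is the Claim_ definition above) =====
theorem generate_postnumbers_spec : Claim_equal_generate_postnumbers := by
  intro lst _
  unfold Spec_generate_postnumbers
  exact pvAB lst
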